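-- pv_equiv track=rewrite | github.com/fexutie/navigation | scaling_game/GLM.py | State_transform
-- ===== SOURCE A (Python) =====
-- def wall_detection(pos, size):
--     if pos[0] == 2:
--         Stim = 1
--     elif pos[0] == 2 + size - 1:
--         Stim = 2
--     elif pos[1] == 2:
--         Stim = 3
--     elif pos[1] == 2 + size - 1:
--         Stim = 4
--     else:
--         Stim = 0
--     return Stim
--
-- def State_transform(State, Poss, size = 15):
-- #     S = [p[0]  for s, p in zip(State, Poss)]
--     S = [wall_detection(pos, size) for pos in Poss]
--     Status = []
--     s1 = 0
--     for s in S: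
--         if s != 0:
--             s1 = s
-- #         print (s1)
--         Status.append(s1)
--
--     return Status
-- ===== SOURCE B (Python) =====
-- def wall_detection(pos, size):
--     if pos[0] == 2:
--         Stim = 1
--     elif pos[0] == 2 + size - 1:
--         Stim = 2
--     elif pos[1] == 2:
--         Stim = 3
--     elif pos[1] == 2 + size - 1:
--         Stim = 4
--     else:
--         Stim = 0
--     return Stim
--
-- def State_transform(State, Poss, size = 15):
--     # single fused recursive pass: detect and forward-fill together,
--     # passing the last nonzero stimulus as an accumulator
--     def fill(poss, last):
--         if not poss:
--             return []
--         s = wall_detection(poss[0], size)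
--         cur = s if s != 0 else last
--         return [cur] + fill(poss[1:], cur)
--     return fill(Poss, 0)
-- ===== Notes on version B (the rewrite author's own statement) =====
-- stated objective: alternative
-- what changed: Replaces A's two-phase map-then-mutable-accumulator loop by a single fused recursive pass that computes the wall stimulus and forward-fills the last nonzero value via an accumulator parameter.
import Mathlib
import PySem

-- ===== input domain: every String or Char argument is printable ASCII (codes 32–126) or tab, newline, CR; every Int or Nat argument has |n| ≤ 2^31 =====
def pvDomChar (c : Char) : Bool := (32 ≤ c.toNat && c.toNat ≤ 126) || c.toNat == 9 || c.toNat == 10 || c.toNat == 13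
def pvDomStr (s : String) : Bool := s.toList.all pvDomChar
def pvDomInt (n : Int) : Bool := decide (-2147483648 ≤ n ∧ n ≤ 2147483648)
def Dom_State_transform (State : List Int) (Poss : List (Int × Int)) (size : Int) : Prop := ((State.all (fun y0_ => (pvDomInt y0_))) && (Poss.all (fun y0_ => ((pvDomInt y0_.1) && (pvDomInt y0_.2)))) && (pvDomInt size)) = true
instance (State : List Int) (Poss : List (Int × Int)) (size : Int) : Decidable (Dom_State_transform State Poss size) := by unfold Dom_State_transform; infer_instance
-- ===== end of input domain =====

-- B fuses A's map-then-mutable-loop into one recursive forward-filling pass (objective: alternative).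


-- ===== PORT A =====
def wall_detection (pos : Int × Int) (size : Int) : Int :=
  if pos.1 = 2 then 1
  else if pos.1 = 2 + size - 1 then 2
  else if pos.2 = 2 then 3
  else if pos.2 = 2 + size - 1 then 4
  else 0

def State_transform (State : List Int) (Poss : List (Int × Int)) (size : Int) : List Int :=
  let S := Poss.map (fun pos => wall_detection pos size)
  let r := S.foldl (fun (st : Int × List Int) s =>
    let s1 := if s ≠ 0 then s else st.1
    (s1, st.2 ++ [s1])) (0, [])
  r.2

-- ===== PORT B =====
def altFill (size : Int) (poss : List (Int × Int)) (last : Int) : List Int :=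
  match poss with
  | [] => []
  | p :: rest =>
    let s := wall_detection p size
    let cur := if s ≠ 0 then s else last
    cur :: altFill size rest cur

def State_transform_alt (State : List Int) (Poss : List (Int × Int)) (size : Int) : List Int :=
  altFill size Poss 0

-- ===== PRECONDITION & SPEC =====
def Spec_State_transform (State : List Int) (Poss : List (Int × Int)) (size : Int) (out : List Int) : Prop := out = State_transform_alt State Poss size
instance (State : List Int) (Poss : List (Int × Int)) (size : Int) (out : List Int) : Decidable (Spec_State_transform State Poss size out) := by unfold Spec_State_transform; infer_instance

-- ===== CLAIM (what is proved, stated in full; the proofs are below) =====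
def Claim_equal_State_transform : Prop := ∀ (State : List Int) (Poss : List (Int × Int)) (size : Int), Dom_State_transform State Poss size → Spec_State_transform State Poss size (State_transform State Poss size)

-- ===== LEMMAS AND PROOFS =====
theorem foldl_fill (size : Int) (Poss : List (Int × Int)) (s1 : Int) (acc : List Int) :
    ((Poss.map (fun pos => wall_detection pos size)).foldl (fun (st : Int × List Int) s =>
      let s1 := if s ≠ 0 then s else st.1
      (s1, st.2 ++ [s1])) (s1, acc)).2 = acc ++ altFill size Poss s1 := by
  induction Poss generalizing s1 acc with
  | nil => simp [altFill]
  | cons p rest ih =>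
    simp only [List.map_cons, List.foldl_cons, altFill]
    rw [ih]
    simp

-- ===== VERDICT (by name: the statement is the Claim_ definition above) =====
theorem State_transform_spec : Claim_equal_State_transform := by
  intro State Poss size _
  show State_transform State Poss size = State_transform_alt State Poss size
  unfold State_transform State_transform_alt
  simpa using foldl_fill size Poss 0 []
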